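-- pv_equiv track=rewrite | github.com/IImAriyan/7th-grade-math | main.py | get_all_three_numbers_mods
-- ===== SOURCE A (Python) =====
-- def get_all_three_numbers_mods(total:int) :
--     count = 0
--     for a in range(total + 1):
--         for b in range(total + 1 - a):
--             c = total - a - b
--             if c >= 0 :
--                 count += 1
--     return count
-- ===== SOURCE B (Python) =====
-- def get_all_three_numbers_mods(total: int):
--     if total < 0:
--         return 0
--     return (total + 1) * (total + 2) // 2
-- ===== Notes on version B (the rewrite author's own statement) =====
-- stated objective: faster
-- what changed: Replaced the quadratic double loop counting nonnegative (a,b,c) with c = total-a-b by the closed-form triangular-number formula (and zero for negative total).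
import Mathlib
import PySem

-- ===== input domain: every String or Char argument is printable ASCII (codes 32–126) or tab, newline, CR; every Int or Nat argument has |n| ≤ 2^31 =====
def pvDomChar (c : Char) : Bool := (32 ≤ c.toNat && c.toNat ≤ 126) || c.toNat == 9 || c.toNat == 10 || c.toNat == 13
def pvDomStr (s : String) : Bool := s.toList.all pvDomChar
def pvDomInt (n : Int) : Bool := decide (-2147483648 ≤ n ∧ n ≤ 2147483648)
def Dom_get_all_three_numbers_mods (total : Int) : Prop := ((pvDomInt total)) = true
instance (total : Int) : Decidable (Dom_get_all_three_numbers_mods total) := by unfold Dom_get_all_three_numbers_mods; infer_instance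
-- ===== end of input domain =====

-- B replaces A's quadratic double loop by the closed-form triangular-number formula (zero for negative total): faster.

-- ===== PORT A =====
def get_all_three_numbers_mods (total : Int) : Int :=
  (PySem.List.pyRange 0 (total + 1) 1).foldl (fun count a =>
    (PySem.List.pyRange 0 (total + 1 - a) 1).foldl (fun count b =>
      let c := total - a - b
      if c ≥ 0 then count + 1 else count) count) 0

-- ===== PORT B =====
def get_all_three_numbers_mods_alt (total : Int) : Int :=
  if total < 0 then 0 else PySem.Int.floordiv ((total + 1) * (total + 2)) 2

-- ===== PRECONDITION & SPEC =====
def Spec_get_all_three_numbers_mods (total : Int) (out : Int) : Prop := out = get_all_three_numbers_mods_alt total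
instance (total : Int) (out : Int) : Decidable (Spec_get_all_three_numbers_mods total out) := by unfold Spec_get_all_three_numbers_mods; infer_instance

-- ===== CLAIM (what is proved, stated in full; the proofs are below) =====
def Claim_equal_get_all_three_numbers_mods : Prop := ∀ (total : Int), Dom_get_all_three_numbers_mods total → Spec_get_all_three_numbers_mods total (get_all_three_numbers_mods total)

-- ===== LEMMAS AND PROOFS =====

-- A's count reduces to a sum of inner-range lengths (the inner condition c ≥ 0 always holds).
lemma A_eq_sum (total : Int) :
    get_all_three_numbers_mods total =
      ((PySem.List.pyRange 0 (total + 1) 1).map (fun a => ((total + 1 - a).toNat : Int))).sum := by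
  unfold get_all_three_numbers_mods
  have hinner : ∀ (acc a : Int), a ∈ PySem.List.pyRange 0 (total + 1) 1 →
      (PySem.List.pyRange 0 (total + 1 - a) 1).foldl (fun count b =>
        have c := total - a - b
        if c ≥ 0 then count + 1 else count) acc = acc + ((total + 1 - a).toNat : Int) := by
    intro acc a _
    simp only []
    rw [PySem.List.foldl_ite_add_one]
    congr 1
    rw [List.countP_eq_length.mpr, PySem.List.length_pyRange_one]
    · norm_num
    · intro b hb
      have := (PySem.List.mem_pyRange_one).mp hb
      simp only [decide_eq_true_eq]
      omega
  refine (PySem.List.foldl_congr_mem _ _ (fun acc a => acc + ((total + 1 - a).toNat : Int)) 0 hinner).trans ?_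
  rw [PySem.List.foldl_add]
  simp

lemma sum_map_succ (f : ℕ → ℕ) (l : List ℕ) : (l.map (fun k => f k + 1)).sum = (l.map f).sum + l.length := by
  induction l with
  | nil => simp
  | cons x xs ih => simp [ih]; omega

-- Gauss: twice the sum of (m - k) over k < m is m(m+1).
lemma tri (m : Nat) : (((List.range m).map (fun k => m - k)).sum) * 2 = m * (m + 1) := by
  induction m with
  | zero => simp
  | succ m ih =>
    rw [List.range_succ, List.map_append, List.sum_append]
    have h : (List.range m).map (fun k => m + 1 - k) = (List.range m).map (fun k => (m - k) + 1) := by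
      apply List.map_congr_left; intro k hk; have := List.mem_range.mp hk; omega
    rw [h, sum_map_succ]
    simp only [List.length_range, List.map_cons, List.map_nil, List.sum_cons, List.sum_nil]
    have ih' : (List.map (HSub.hSub m) (List.range m)).sum * 2 = m * (m + 1) := ih
    have hgoal : m * (m + 1) + (m + 1) * 2 = (m + 1) * (m + 1 + 1) := by ring
    omega

-- ===== VERDICT (by name: the statement is the Claim_ definition above) =====
theorem get_all_three_numbers_mods_spec : Claim_equal_get_all_three_numbers_mods := by
  intro total _
  unfold Spec_get_all_three_numbers_mods
  by_cases hneg : total < 0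
  · unfold get_all_three_numbers_mods get_all_three_numbers_mods_alt
    rw [PySem.List.pyRange_one_eq_nil (by omega), if_pos hneg]
    rfl
  · obtain ⟨n, hn⟩ : ∃ n : ℕ, total = (n : Int) := ⟨total.toNat, by omega⟩
    subst hn
    rw [A_eq_sum, PySem.List.pyRange_one]
    have h1 : ((n : Int) + 1 - 0).toNat = n + 1 := by omega
    rw [List.map_map, h1]
    have h3 : (List.range (n+1)).map ((fun a => (((n:Int) + 1 - a).toNat : Int)) ∘ (fun k : ℕ => (0:Int) + (k:Int)))
        = (List.range (n+1)).map (fun k : ℕ => (((n + 1 - k : Nat)) : Int)) := by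
      apply List.map_congr_left; intro k hk; simp; omega
    rw [h3]
    have key : ((List.range (n+1)).map (fun k : ℕ => (((n + 1 - k : Nat)) : Int))).sum * 2
        = ((n:Int) + 1) * ((n:Int) + 2) := by
      have h5 := congrArg (fun x : ℕ => (x : Int)) (tri (n+1))
      push_cast at h5
      rw [List.map_map] at h5
      exact h5.trans (by ring)
    unfold get_all_three_numbers_mods_alt
    rw [if_neg (by omega), PySem.Int.floordiv_eq_ediv_of_pos (by norm_num)]
    generalize hP : ((n:Int) + 1) * ((n:Int) + 2) = P at *
    omega
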